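-- pv_equiv track=rewrite | github.com/MaxLSB/word2vec | word2vec.py | flatten_dataset_to_lists
-- ===== SOURCE A (Python) =====
-- def extract_words_contexts(text_ids, R):
--     words = []
--     contexts = []
--     for i in range(len(text_ids)):
--         words.append(text_ids[i])
--         context = []
--         for j in range(max(0, i - R), min(len(text_ids), i + R + 1)):
--             if i != j:
--                 context.append(text_ids[j])
--         if (
--             len(context) < 2 * R
--         ):  # Adding a padding token of id 0 when the context is less than 2R
--             context += [0] * (2 * R - len(context))
--         contexts.append(context)
--     return words, contexts
--
-- def flatten_dataset_to_lists(dataset, R):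
--     words = []
--     contexts = []
--     for example in dataset:
--         w, c = extract_words_contexts(example["review_ids"], R)
--         words.extend(w)
--         contexts.extend(c)
--     return contexts, words
-- ===== SOURCE B (Python) =====
-- def flatten_dataset_to_lists(dataset, R):
--     R = max(R, 0)  # a window radius is never negative
--     contexts = []
--     words = []
--     for example in dataset:
--         t = example["review_ids"]
--         n = len(t)
--         words += t
--         for i in range(n):
--             ctx = t[max(0, i - R):i] + t[i + 1:i + 1 + R]
--             if len(ctx) < 2 * R:
--                 ctx += [0] * (2 * R - len(ctx))
--             contexts.append(ctx)
--     return contexts, words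
-- ===== Notes on version B (the rewrite author's own statement) =====
-- stated objective: simpler
-- what changed: B drops the helper and the inner per-index scan with its i != j test: after clamping R = max(R, 0) it builds each context as the concatenation of two contiguous slices and extends words by the whole review in one step.
import Mathlib
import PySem

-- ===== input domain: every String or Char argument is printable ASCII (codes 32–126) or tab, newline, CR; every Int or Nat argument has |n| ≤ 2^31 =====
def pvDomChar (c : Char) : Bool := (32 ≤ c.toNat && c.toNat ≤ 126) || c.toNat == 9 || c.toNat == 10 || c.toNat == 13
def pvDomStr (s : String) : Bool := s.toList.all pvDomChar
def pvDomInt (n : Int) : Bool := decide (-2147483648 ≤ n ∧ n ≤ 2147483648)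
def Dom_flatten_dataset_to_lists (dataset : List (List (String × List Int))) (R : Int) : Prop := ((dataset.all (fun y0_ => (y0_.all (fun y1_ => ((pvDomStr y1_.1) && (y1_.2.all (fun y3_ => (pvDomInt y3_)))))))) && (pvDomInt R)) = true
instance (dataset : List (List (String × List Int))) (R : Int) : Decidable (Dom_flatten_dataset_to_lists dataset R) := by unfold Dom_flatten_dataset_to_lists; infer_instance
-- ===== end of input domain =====

-- B replaces the per-index inner scan with two slices under an up-front clamp R = max(R,0); objective: simpler.

-- ===== PORT A =====
-- helper: extract_words_contexts(text_ids, R)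
def extract_words_contexts (text_ids : List Int) (R : Int) : List Int × List (List Int) :=
  (PySem.List.pyRange 0 (text_ids.length : Int) 1).foldl
    (fun (st : List Int × List (List Int)) i =>
      let words := st.1 ++ [PySem.List.pyGetD text_ids i 0]
      let context :=
        (PySem.List.pyRange (max 0 (i - R)) (min (text_ids.length : Int) (i + R + 1)) 1).foldl
          (fun ctx j => if i ≠ j then ctx ++ [PySem.List.pyGetD text_ids j 0] else ctx) []
      let context :=
        if (context.length : Int) < 2 * R then
          context ++ List.replicate (2 * R - (context.length : Int)).toNat 0
        else context
      (words, st.2 ++ [context]))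
    ([], [])

def flatten_dataset_to_lists (dataset : List (List (String × List Int))) (R : Int) : List (List Int) × List Int :=
  let st := dataset.foldl
    (fun (st : List Int × List (List Int)) ex =>
      let wc := extract_words_contexts ((PySem.Dict.mk ex).getD "review_ids" []) R
      (st.1 ++ wc.1, st.2 ++ wc.2))
    ([], [])
  (st.2, st.1)

-- ===== PORT B =====
def flatten_dataset_to_lists_alt (dataset : List (List (String × List Int))) (R : Int) : List (List Int) × List Int :=
  let R' := max R 0
  dataset.foldl
    (fun (st : List (List Int) × List Int) ex =>
      let t := (PySem.Dict.mk ex).getD "review_ids" []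
      let n : Int := t.length
      let words := st.2 ++ t
      let contexts :=
        (PySem.List.pyRange 0 n 1).foldl
          (fun cs i =>
            let ctx := PySem.List.slice t (some (max 0 (i - R'))) (some i) ++
                       PySem.List.slice t (some (i + 1)) (some (i + 1 + R'))
            let ctx :=
              if (ctx.length : Int) < 2 * R' then
                ctx ++ List.replicate (2 * R' - (ctx.length : Int)).toNat 0
              else ctx
            cs ++ [ctx])
          st.1
      (contexts, words))
    ([], [])

-- ===== PRECONDITION & SPEC =====
-- Pre_ excludes datasets where some ex lacks the key "review_ids": there A raises KeyError (and B raises too).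
def Pre_flatten_dataset_to_lists (dataset : List (List (String × List Int))) (R : Int) : Prop :=
  ∀ ex ∈ dataset, (PySem.Dict.mk ex).contains "review_ids" = true
instance (dataset : List (List (String × List Int))) (R : Int) : Decidable (Pre_flatten_dataset_to_lists dataset R) := by unfold Pre_flatten_dataset_to_lists; infer_instance

def pvWitness_flatten_dataset_to_lists : (List (List (String × List Int))) × Int :=
  ([[("review_ids", [3, 1, 2])], [("review_ids", [5])]], 1)

def Spec_flatten_dataset_to_lists (dataset : List (List (String × List Int))) (R : Int) (out : List (List Int) × List Int) : Prop := out = flatten_dataset_to_lists_alt dataset R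
instance (dataset : List (List (String × List Int))) (R : Int) (out : List (List Int) × List Int) : Decidable (Spec_flatten_dataset_to_lists dataset R out) := by unfold Spec_flatten_dataset_to_lists; infer_instance

-- ===== CLAIM (what is proved, stated in full; the proofs are below) =====
def Claim_equal_flatten_dataset_to_lists : Prop := ∀ (dataset : List (List (String × List Int))) (R : Int), Dom_flatten_dataset_to_lists dataset R → Pre_flatten_dataset_to_lists dataset R → Spec_flatten_dataset_to_lists dataset R (flatten_dataset_to_lists dataset R)

-- ===== LEMMAS AND PROOFS =====

lemma map_pyGetD_eq_slice (t : List Int) (a b : Int) (h0 : 0 ≤ a) (h0b : 0 ≤ b) (hb : b ≤ (t.length : Int)) :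
    (PySem.List.pyRange a b 1).map (fun j => PySem.List.pyGetD t j 0) =
    PySem.List.slice t (some a) (some b) := by
  rw [PySem.List.slice_toNat t h0 h0b, PySem.List.pyRange_one, List.map_map]
  apply List.ext_getElem
  · simp; omega
  · intro k h1 h2
    simp only [List.length_map, List.length_range] at h1
    simp only [List.getElem_map, List.getElem_range, Function.comp_apply,
      List.getElem_take, List.getElem_drop]
    rw [PySem.List.pyGetD_eq_getElem t 0 (by omega) (by omega)]
    congr 1
    omega

lemma slice_clamp (t : List Int) (x y : Int) (hx : 0 ≤ x) (hy : 0 ≤ y) :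
    PySem.List.slice t (some x) (some (min (t.length : Int) y)) =
    PySem.List.slice t (some x) (some y) := by
  rcases le_or_gt y (t.length : Int) with h | h
  · rw [min_eq_right h]
  · rw [min_eq_left h.le, PySem.List.slice_toNat t hx (by positivity),
      PySem.List.slice_toNat t hx hy]
    rw [List.take_of_length_le (i := (t.length : Int).toNat - x.toNat) (by simp [List.length_drop]; try omega)]
    rw [List.take_of_length_le (i := y.toNat - x.toNat) (by simp [List.length_drop]; try omega)]

lemma ctx_eq (t : List Int) (R i : Int) (h0 : 0 ≤ i) (hi : i < (t.length : Int)) :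
    (let context :=
        (PySem.List.pyRange (max 0 (i - R)) (min (t.length : Int) (i + R + 1)) 1).foldl
          (fun ctx j => if i ≠ j then ctx ++ [PySem.List.pyGetD t j 0] else ctx) []
     if (context.length : Int) < 2 * R then
        context ++ List.replicate (2 * R - (context.length : Int)).toNat 0
     else context) =
    (let ctx := PySem.List.slice t (some (max 0 (i - max R 0))) (some i) ++
                PySem.List.slice t (some (i + 1)) (some (i + 1 + max R 0))
     if (ctx.length : Int) < 2 * (max R 0) then
        ctx ++ List.replicate (2 * (max R 0) - (ctx.length : Int)).toNat 0
     else ctx) := by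
  simp only []
  rw [PySem.List.foldl_append_ite (p := fun j => i ≠ j) (f := fun j => PySem.List.pyGetD t j 0),
    List.nil_append]
  rcases le_or_gt R 0 with hR | hR
  · -- R ≤ 0 : both contexts are empty and no padding fires
    have hmax : max R 0 = 0 := by omega
    have hfil : (PySem.List.pyRange (max 0 (i - R)) (min (t.length : Int) (i + R + 1)) 1).filter
        (fun j => decide (i ≠ j)) = [] := by
      apply List.filter_eq_nil_iff.mpr
      intro j hj
      rw [PySem.List.mem_pyRange_one] at hj
      simp only [decide_eq_true_eq] -- goal: ¬ decide (i ≠ j) = true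
      simp only [ne_eq, not_not]
      omega
    rw [hfil, hmax]
    have h1 : PySem.List.slice t (some (max 0 (i - 0))) (some i) = [] := by
      have : max 0 (i - 0) = i := by omega
      rw [this, PySem.List.slice_toNat t h0 h0, List.take_eq_nil_iff.mpr (by omega)]
    have h2 : PySem.List.slice t (some (i + 1)) (some (i + 1 + 0)) = [] := by
      rw [PySem.List.slice_toNat t (by omega) (by omega), List.take_eq_nil_iff.mpr (by omega)]
    rw [h1, h2]
    simp
    omega
  · -- R > 0
    have hmax : max R 0 = R := by omega
    rw [hmax]
    have ha : max 0 (i - R) ≤ i := by omega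
    have hb1 : i ≤ min (t.length : Int) (i + R + 1) := by omega
    have hib : i < min (t.length : Int) (i + R + 1) := by omega
    rw [PySem.List.pyRange_one_append (max 0 (i - R)) i (min (t.length : Int) (i + R + 1)) ha hb1,
      PySem.List.pyRange_one_cons hib, List.filter_append, List.filter_cons]
    have hii : (decide (i ≠ i)) = false := by simp
    rw [hii]
    simp only [Bool.false_eq_true, if_false]
    have hfl : (PySem.List.pyRange (max 0 (i - R)) i 1).filter (fun j => decide (i ≠ j)) =
        PySem.List.pyRange (max 0 (i - R)) i 1 := by
      apply List.filter_eq_self.mpr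
      intro j hj
      rw [PySem.List.mem_pyRange_one] at hj
      simp only [ne_eq, decide_not, Bool.not_eq_true', decide_eq_false_iff_not]
      omega
    have hfr : (PySem.List.pyRange (i + 1) (min (t.length : Int) (i + R + 1)) 1).filter
        (fun j => decide (i ≠ j)) = PySem.List.pyRange (i + 1) (min (t.length : Int) (i + R + 1)) 1 := by
      apply List.filter_eq_self.mpr
      intro j hj
      rw [PySem.List.mem_pyRange_one] at hj
      simp only [ne_eq, decide_not, Bool.not_eq_true', decide_eq_false_iff_not]
      omega
    rw [hfl, hfr, List.map_append,
      map_pyGetD_eq_slice t _ i (by omega) h0 (by omega),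
      map_pyGetD_eq_slice t (i+1) _ (by omega) (by omega) (by omega)]
    have : min (t.length : Int) (i + R + 1) = min (t.length : Int) (i + 1 + R) := by omega
    rw [this, slice_clamp t (i+1) (i+1+R) (by omega) (by omega)]


-- B's per-index context function (the body of B's inner loop)
def bctx (t : List Int) (R i : Int) : List Int :=
  let ctx := PySem.List.slice t (some (max 0 (i - max R 0))) (some i) ++
             PySem.List.slice t (some (i + 1)) (some (i + 1 + max R 0))
  if (ctx.length : Int) < 2 * (max R 0) then
    ctx ++ List.replicate (2 * (max R 0) - (ctx.length : Int)).toNat 0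
  else ctx

lemma extract_eq (t : List Int) (R : Int) :
    extract_words_contexts t R =
    (t, (PySem.List.pyRange 0 (t.length : Int) 1).map (bctx t R)) := by
  unfold extract_words_contexts
  rw [PySem.List.foldl_prod_mk
      (f := fun acc i => acc ++ [PySem.List.pyGetD t i 0])
      (g := fun acc i => acc ++
        [let context :=
            (PySem.List.pyRange (max 0 (i - R)) (min (t.length : Int) (i + R + 1)) 1).foldl
              (fun ctx j => if i ≠ j then ctx ++ [PySem.List.pyGetD t j 0] else ctx) []
         if (context.length : Int) < 2 * R then
            context ++ List.replicate (2 * R - (context.length : Int)).toNat 0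
         else context])]
  rw [PySem.List.foldl_append_singleton_eq_map, PySem.List.foldl_append_singleton_eq_map,
    List.nil_append, List.nil_append, PySem.List.map_pyGetD_pyRange_zero']
  refine Prod.ext rfl ?_
  apply List.map_congr_left
  intro i hi
  rw [PySem.List.mem_pyRange_one] at hi
  exact ctx_eq t R i hi.1 hi.2

lemma outer_eq (R : Int) (ds : List (List (String × List Int))) :
    ∀ (w : List Int) (c : List (List Int)),
    ds.foldl
      (fun (st : List Int × List (List Int)) ex =>
        let wc := extract_words_contexts ((PySem.Dict.mk ex).getD "review_ids" []) R
        (st.1 ++ wc.1, st.2 ++ wc.2)) (w, c) =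
    ((ds.foldl
      (fun (st : List (List Int) × List Int) ex =>
        let t := (PySem.Dict.mk ex).getD "review_ids" []
        let n : Int := t.length
        let words := st.2 ++ t
        let contexts :=
          (PySem.List.pyRange 0 n 1).foldl
            (fun cs i =>
              let ctx := PySem.List.slice t (some (max 0 (i - max R 0))) (some i) ++
                         PySem.List.slice t (some (i + 1)) (some (i + 1 + max R 0))
              let ctx :=
                if (ctx.length : Int) < 2 * (max R 0) then
                  ctx ++ List.replicate (2 * (max R 0) - (ctx.length : Int)).toNat 0
                else ctx
              cs ++ [ctx])
            st.1
        (contexts, words)) (c, w)).2,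
     (ds.foldl
      (fun (st : List (List Int) × List Int) ex =>
        let t := (PySem.Dict.mk ex).getD "review_ids" []
        let n : Int := t.length
        let words := st.2 ++ t
        let contexts :=
          (PySem.List.pyRange 0 n 1).foldl
            (fun cs i =>
              let ctx := PySem.List.slice t (some (max 0 (i - max R 0))) (some i) ++
                         PySem.List.slice t (some (i + 1)) (some (i + 1 + max R 0))
              let ctx :=
                if (ctx.length : Int) < 2 * (max R 0) then
                  ctx ++ List.replicate (2 * (max R 0) - (ctx.length : Int)).toNat 0
                else ctx
              cs ++ [ctx])
            st.1
        (contexts, words)) (c, w)).1) := by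
  induction ds with
  | nil => intro w c; rfl
  | cons ex ds ih =>
    intro w c
    rw [List.foldl_cons, List.foldl_cons]
    have hstep : ((PySem.List.pyRange 0 (((PySem.Dict.mk ex).getD "review_ids" []).length : Int) 1).foldl
        (fun cs i =>
          let ctx := PySem.List.slice ((PySem.Dict.mk ex).getD "review_ids" []) (some (max 0 (i - max R 0))) (some i) ++
                     PySem.List.slice ((PySem.Dict.mk ex).getD "review_ids" []) (some (i + 1)) (some (i + 1 + max R 0))
          let ctx :=
            if (ctx.length : Int) < 2 * (max R 0) then
              ctx ++ List.replicate (2 * (max R 0) - (ctx.length : Int)).toNat 0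
            else ctx
          cs ++ [ctx]) c) =
        c ++ (PySem.List.pyRange 0 (((PySem.Dict.mk ex).getD "review_ids" []).length : Int) 1).map
          (bctx ((PySem.Dict.mk ex).getD "review_ids" []) R) := by
      have hfun : (fun (cs : List (List Int)) (i : Int) =>
          let ctx := PySem.List.slice ((PySem.Dict.mk ex).getD "review_ids" []) (some (max 0 (i - max R 0))) (some i) ++
                     PySem.List.slice ((PySem.Dict.mk ex).getD "review_ids" []) (some (i + 1)) (some (i + 1 + max R 0))
          let ctx :=
            if (ctx.length : Int) < 2 * (max R 0) then
              ctx ++ List.replicate (2 * (max R 0) - (ctx.length : Int)).toNat 0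
            else ctx
          cs ++ [ctx]) =
          (fun cs i => cs ++ [bctx ((PySem.Dict.mk ex).getD "review_ids" []) R i]) := rfl
      rw [hfun, PySem.List.foldl_append_singleton_eq_map]
    have hA : (let wc := extract_words_contexts ((PySem.Dict.mk ex).getD "review_ids" []) R
               (((w, c) : List Int × List (List Int)).1 ++ wc.1, ((w, c) : List Int × List (List Int)).2 ++ wc.2)) =
        (w ++ (PySem.Dict.mk ex).getD "review_ids" [],
         c ++ (PySem.List.pyRange 0 (((PySem.Dict.mk ex).getD "review_ids" []).length : Int) 1).map
           (bctx ((PySem.Dict.mk ex).getD "review_ids" []) R)) := by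
      rw [extract_eq]
    rw [hA]
    have hB : (let t := (PySem.Dict.mk ex).getD "review_ids" []
               let n : Int := t.length
               let words := (((c, w) : List (List Int) × List Int)).2 ++ t
               let contexts :=
                 (PySem.List.pyRange 0 n 1).foldl
                   (fun cs i =>
                     let ctx := PySem.List.slice t (some (max 0 (i - max R 0))) (some i) ++
                                PySem.List.slice t (some (i + 1)) (some (i + 1 + max R 0))
                     let ctx :=
                       if (ctx.length : Int) < 2 * (max R 0) then
                         ctx ++ List.replicate (2 * (max R 0) - (ctx.length : Int)).toNat 0
                       else ctx
                     cs ++ [ctx])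
                   (((c, w) : List (List Int) × List Int)).1
               ((contexts, words) : List (List Int) × List Int)) =
        (c ++ (PySem.List.pyRange 0 (((PySem.Dict.mk ex).getD "review_ids" []).length : Int) 1).map
           (bctx ((PySem.Dict.mk ex).getD "review_ids" []) R),
         w ++ (PySem.Dict.mk ex).getD "review_ids" []) := by
      simp only []
      rw [hstep]
    rw [hB]
    exact ih _ _

-- ===== VERDICT (by name: the statement is the Claim_ definition above) =====
theorem flatten_dataset_to_lists_spec : Claim_equal_flatten_dataset_to_lists := by
  intro dataset R _ _
  unfold Spec_flatten_dataset_to_lists flatten_dataset_to_lists flatten_dataset_to_lists_alt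
  simp only []
  rw [outer_eq R dataset [] []]
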